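-- pv_equiv track=rewrite | github.com/tyler-daigle/advent_of_code_2021 | day7/day7v2.py | calc_fuel_used
-- ===== SOURCE A (Python) =====
-- def calc_fuel_used(data, pos):
--     fuel_used = 0
--     for num in data:
--         amount_to_move = 0
--         if num == pos:
--             continue # skip the ones that don't move
--         if num > pos:
--             amount_to_move = num - pos
--         else:
--             amount_to_move = pos - num
--
--         for fuel_cost in range(1,amount_to_move + 1):
--             fuel_used += fuel_cost
--         # fuel_used += amount_to_move
--
--     return fuel_used
-- ===== SOURCE B (Python) =====
-- def calc_fuel_used(data, pos):
--     fuel_used = 0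
--     for num in data:
--         d = abs(num - pos)
--         fuel_used += d * (d + 1) // 2
--     return fuel_used
-- ===== Notes on version B (the rewrite author's own statement) =====
-- stated objective: faster
-- what changed: Replaces the inner range(1,d+1) summation loop by the closed-form triangular number d*(d+1)//2 (and abs instead of branching), making each element O(1).
import Mathlib
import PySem

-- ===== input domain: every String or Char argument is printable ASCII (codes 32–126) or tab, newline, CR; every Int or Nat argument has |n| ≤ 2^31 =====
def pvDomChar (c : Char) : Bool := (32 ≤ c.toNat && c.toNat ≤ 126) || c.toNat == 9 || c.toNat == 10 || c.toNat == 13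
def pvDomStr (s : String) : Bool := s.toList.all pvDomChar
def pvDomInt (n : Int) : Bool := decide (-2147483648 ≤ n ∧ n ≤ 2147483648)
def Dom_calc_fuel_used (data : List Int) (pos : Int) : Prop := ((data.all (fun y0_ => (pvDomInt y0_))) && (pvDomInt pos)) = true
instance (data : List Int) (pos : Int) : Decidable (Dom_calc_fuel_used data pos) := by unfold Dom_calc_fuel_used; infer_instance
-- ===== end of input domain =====

-- B replaces A's inner range(1,d+1) summation loop by the closed-form triangular number d*(d+1)//2 (objective: faster).

-- ===== PORT A =====
def calc_fuel_used (data : List Int) (pos : Int) : Int :=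
  data.foldl
    (fun fuel_used num =>
      if num == pos then fuel_used
      else
        let amount_to_move : Int := if num > pos then num - pos else pos - num
        (PySem.List.pyRange 1 (amount_to_move + 1) 1).foldl
          (fun acc fuel_cost => acc + fuel_cost) fuel_used)
    0

-- ===== PORT B =====
def calc_fuel_used_alt (data : List Int) (pos : Int) : Int :=
  data.foldl
    (fun fuel_used num =>
      let d : Int := |num - pos|
      fuel_used + PySem.Int.floordiv (d * (d + 1)) 2)
    0

-- ===== PRECONDITION & SPEC =====
def Spec_calc_fuel_used (data : List Int) (pos : Int) (out : Int) : Prop := out = calc_fuel_used_alt data pos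
instance (data : List Int) (pos : Int) (out : Int) : Decidable (Spec_calc_fuel_used data pos out) := by unfold Spec_calc_fuel_used; infer_instance

-- ===== CLAIM (what is proved, stated in full; the proofs are below) =====
def Claim_equal_calc_fuel_used : Prop := ∀ (data : List Int) (pos : Int), Dom_calc_fuel_used data pos → Spec_calc_fuel_used data pos (calc_fuel_used data pos)

-- ===== LEMMAS AND PROOFS =====

-- the sum of range(1, d+1) started at acc is acc + the triangular number d*(d+1)//2, for 0 ≤ d
theorem pv_tri_sum (n : Nat) (acc : Int) :
    (PySem.List.pyRange 1 ((n : Int) + 1) 1).foldl (fun a c => a + c) acc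
      = acc + PySem.Int.floordiv ((n : Int) * ((n : Int) + 1)) 2 := by
  induction n generalizing acc with
  | zero => simp [PySem.List.pyRange_one_eq_nil, PySem.Int.floordiv]
  | succ m ih =>
      have h : ((m + 1 : Nat) : Int) + 1 = ((m : Int) + 1) + 1 := by push_cast; ring
      rw [h, PySem.List.pyRange_one_succ_right (by omega),
          List.foldl_append, ih]
      have hm : ∀ k : Int, 0 ≤ k → PySem.Int.floordiv (k * (k + 1)) 2 * 2 = k * (k + 1) := by
        intro k hk
        have h2 : (2 : Int) ∣ k * (k + 1) := (Int.even_mul_succ_self k).two_dvd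
        have := PySem.Int.floordiv_mul_add_mod (k * (k + 1)) 2
        have hmod : PySem.Int.mod (k * (k + 1)) 2 = 0 :=
          (PySem.Int.mod_eq_zero_iff_dvd _ _).2 h2
        omega
      simp only [List.foldl_cons, List.foldl_nil]
      have e1 := hm (m : Int) (by positivity)
      have e2 := hm ((m : Int) + 1) (by positivity)
      push_cast
      push_cast at e1 e2
      nlinarith [e1, e2]

theorem pv_step (fuel : Int) (num pos : Int) :
    (if num == pos then fuel
     else
       let amount_to_move : Int := if num > pos then num - pos else pos - num
       (PySem.List.pyRange 1 (amount_to_move + 1) 1).foldl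
         (fun acc fuel_cost => acc + fuel_cost) fuel)
    = fuel + PySem.Int.floordiv (|num - pos| * (|num - pos| + 1)) 2 := by
  by_cases h : num = pos
  · subst h
    simp [PySem.Int.floordiv]
  · simp only [beq_iff_eq, h, if_false]
    set d : Int := if num > pos then num - pos else pos - num with hd
    have habs : |num - pos| = d := by
      rw [hd]; rcases lt_or_gt_of_ne h with h1 | h1
      · rw [if_neg (by omega), abs_of_neg (by omega)]; ring
      · rw [if_pos (by omega), abs_of_pos (by omega)]
    have hnn : 0 ≤ d := by rw [← habs]; exact abs_nonneg _
    obtain ⟨n, hn⟩ : ∃ n : Nat, d = (n : Int) := ⟨d.toNat, (Int.toNat_of_nonneg hnn).symm⟩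
    rw [habs, hn]
    exact pv_tri_sum n fuel

theorem pv_main (data : List Int) (pos : Int) :
    calc_fuel_used data pos = calc_fuel_used_alt data pos := by
  unfold calc_fuel_used calc_fuel_used_alt
  induction data using List.reverseRecOn with
  | nil => rfl
  | append_singleton xs x ih =>
      rw [List.foldl_append, List.foldl_append, ih]
      simp only [List.foldl_cons, List.foldl_nil]
      exact pv_step _ x pos

-- ===== VERDICT (by name: the statement is the Claim_ definition above) =====
theorem calc_fuel_used_spec : Claim_equal_calc_fuel_used := by
  intro data pos _
  exact pv_main data pos
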